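-- pv_equiv track=rewrite | github.com/sawarniayush/Preference-Learning-with-Response-Time | image_experiments/generate_embeddings.py | compute_shards
-- ===== SOURCE A (Python) =====
-- import math
-- from typing import Dict, List, Sequence
--
-- def compute_shards(dataset, num_workers: int) -> List[tuple[int, int, int]]:
--     total = len(dataset)
--     if total == 0:
--         return []
--
--     chunk_size = math.ceil(total / num_workers)
--     shards: List[tuple[int, int, int]] = []
--     start = 0
--     rank = 0
--     while start < total and rank < num_workers:
--         end = min(start + chunk_size, total)
--         shards.append((rank, start, end))
--         start = end
--         rank += 1
--     return shards
-- ===== SOURCE B (Python) =====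
-- import math
-- from typing import List
--
-- def compute_shards(dataset, num_workers: int) -> List[tuple[int, int, int]]:
--     total = len(dataset)
--     if total == 0:
--         return []
--     chunk_size = math.ceil(total / num_workers)
--     if num_workers <= 0:
--         return []  # non-positive worker count: no shards
--     # Staged construction: first the list of cut points (shard boundaries),
--     # then pair adjacent boundaries and number them.
--     cuts = list(range(0, total, chunk_size)) + [total]
--     return [(r, s, e) for r, (s, e) in enumerate(zip(cuts, cuts[1:]))]
-- ===== Notes on version B (the rewrite author's own statement) =====
-- stated objective: alternative
-- what changed: A threads an accumulator (start = end) through a while loop emitting one shard per iteration with a min clamp; B instead builds the boundary list in one stage with a stepped range(0, total, chunk_size) plus the final cut [total], then pairs adjacent boundaries with zip and numbers them with enumerate - no accumulator, no min clamp, no rank bound in the loop.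
import Mathlib
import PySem

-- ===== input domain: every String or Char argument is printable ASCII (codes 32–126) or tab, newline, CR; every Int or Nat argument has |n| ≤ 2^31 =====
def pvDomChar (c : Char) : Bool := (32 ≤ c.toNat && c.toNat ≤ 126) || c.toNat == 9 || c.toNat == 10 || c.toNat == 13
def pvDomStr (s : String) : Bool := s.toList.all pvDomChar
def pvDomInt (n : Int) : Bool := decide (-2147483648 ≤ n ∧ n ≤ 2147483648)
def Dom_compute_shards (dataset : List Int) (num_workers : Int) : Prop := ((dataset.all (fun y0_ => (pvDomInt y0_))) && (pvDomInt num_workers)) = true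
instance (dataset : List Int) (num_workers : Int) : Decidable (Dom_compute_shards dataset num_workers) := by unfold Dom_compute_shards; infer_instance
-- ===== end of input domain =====

-- B replaces A's accumulator while loop by a staged construction: the boundary list
-- range(0, total, chunk_size) + [total], then adjacent pairs zipped and numbered;
-- objective: alternative decomposition, same cost.

-- ===== PORT A =====
-- math.ceil(total / num_workers) ported as exact ceiling division -((-total) // num_workers);
-- exact on the stated domain (total = a list length, |num_workers| ≤ 2^31: the float division is exact enough there).
def pyCeilDiv (a b : Int) : Int := -(PySem.Int.floordiv (-a) b)

-- the while loop; fuel = num_workers.toNat counts the remaining ranks (rank < num_workers ↔ fuel > 0)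
def shardLoopA (total chunk : Int) : Int → Int → Nat → List (Int × Int × Int)
  | _, _, 0 => []
  | start, rank, f + 1 =>
      if start < total then
        let e := min (start + chunk) total
        (rank, start, e) :: shardLoopA total chunk e (rank + 1) f
      else []

def compute_shards (dataset : List Int) (num_workers : Int) : List (Int × Int × Int) :=
  let total : Int := dataset.length
  if total = 0 then []
  else
    let chunk_size := pyCeilDiv total num_workers
    shardLoopA total chunk_size 0 0 num_workers.toNat

-- ===== PORT B =====
def compute_shards_alt (dataset : List Int) (num_workers : Int) : List (Int × Int × Int) :=
  let total : Int := dataset.length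
  if total = 0 then []
  else
    let chunk_size := pyCeilDiv total num_workers
    if num_workers ≤ 0 then []
    else
      let cuts := PySem.List.pyRange 0 total chunk_size ++ [total]
      (PySem.List.enumerate (cuts.zip cuts.tail)).map (fun p => (p.1, p.2.1, p.2.2))

-- ===== PRECONDITION & SPEC =====
-- Pre_ excludes exactly the inputs where Python A raises ZeroDivisionError:
-- num_workers = 0 with a non-empty dataset (B raises there too).
def Pre_compute_shards (dataset : List Int) (num_workers : Int) : Prop :=
  dataset = [] ∨ num_workers ≠ 0
instance (dataset : List Int) (num_workers : Int) : Decidable (Pre_compute_shards dataset num_workers) := by unfold Pre_compute_shards; infer_instance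

def pvWitness_compute_shards : List Int × Int := ([3, 1, 4, 1, 5], 2)

def Spec_compute_shards (dataset : List Int) (num_workers : Int) (out : List (Int × Int × Int)) : Prop := out = compute_shards_alt dataset num_workers
instance (dataset : List Int) (num_workers : Int) (out : List (Int × Int × Int)) : Decidable (Spec_compute_shards dataset num_workers out) := by unfold Spec_compute_shards; infer_instance

-- ===== CLAIM (what is proved, stated in full; the proofs are below) =====
def Claim_equal_compute_shards : Prop := ∀ (dataset : List Int) (num_workers : Int), Dom_compute_shards dataset num_workers → Pre_compute_shards dataset num_workers → Spec_compute_shards dataset num_workers (compute_shards dataset num_workers)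

-- ===== LEMMAS AND PROOFS =====

lemma shardLoopA_stop (total chunk start rank : Int) (f : Nat) (h : ¬ start < total) :
    shardLoopA total chunk start rank f = [] := by
  cases f <;> simp [shardLoopA, h]

lemma ceil_pos (total w : Int) (ht : 0 < total) (hw : 0 < w) : 0 < pyCeilDiv total w := by
  unfold pyCeilDiv
  rw [PySem.Int.floordiv_eq_ediv_of_pos hw]
  have h1 : (-total) / w ≤ -1 := by
    have : (-total) / w < 0 := Int.ediv_neg_of_neg_of_pos (by omega) hw
    omega
  omega

lemma ceil_bracket (a b : Int) (hb : 0 < b) :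
    (pyCeilDiv a b - 1) * b < a ∧ a ≤ pyCeilDiv a b * b :=
  (PySem.Int.neg_floordiv_neg_eq_iff_of_pos hb).mp rfl

-- A's while loop produces the closed-form shard list (invariant: start = r * chunk).
lemma loop_eq_range (total chunk nw n : Int) (hc : 0 < chunk)
    (hn1 : (n - 1) * chunk < total) (hn2 : total ≤ n * chunk) (hnw : n ≤ nw) :
    ∀ (f : Nat) (r : Int), f = (nw - r).toNat →
      shardLoopA total chunk (r * chunk) r f =
      (PySem.List.pyRange r n 1).map
        (fun x => (x, x * chunk, min ((x + 1) * chunk) total)) := by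
  intro f
  induction f with
  | zero =>
      intro r hr
      rw [PySem.List.pyRange_one_eq_nil (by omega)]
      simp [shardLoopA]
  | succ f ih =>
      intro r hr
      have hrn : r < nw := by omega
      have hmul : r * chunk + chunk = (r + 1) * chunk := by ring
      by_cases hs : r * chunk < total
      · have hrltn : r < n := by nlinarith
        rw [PySem.List.pyRange_one_cons hrltn]
        simp only [shardLoopA, if_pos hs, List.map_cons, hmul]
        congr 1
        by_cases hcl : (r + 1) * chunk < total
        · rw [min_eq_left (le_of_lt hcl)]
          exact ih (r + 1) (by omega)
        · have hle : n ≤ r + 1 := by nlinarith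
          rw [min_eq_right (by omega), shardLoopA_stop _ _ _ _ _ (lt_irrefl total),
              PySem.List.pyRange_one_eq_nil hle, List.map_nil]
      · have hle : n ≤ r := by nlinarith
        rw [shardLoopA_stop _ _ _ _ _ hs, PySem.List.pyRange_one_eq_nil hle, List.map_nil]

-- the boundary list from offset a: chunk*a, chunk*(a+1), …, chunk*(n-1), total
def cutsFrom (chunk t n a : Int) : List Int :=
  (PySem.List.pyRange a n 1).map (fun x => chunk * x) ++ [t]

lemma cutsFrom_cons (chunk t n a : Int) (h : a < n) :
    cutsFrom chunk t n a = chunk * a :: cutsFrom chunk t n (a + 1) := by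
  unfold cutsFrom
  rw [PySem.List.pyRange_one_cons h]
  simp

lemma cutsFrom_last (chunk t n a : Int) (h : ¬ a < n) :
    cutsFrom chunk t n a = [t] := by
  unfold cutsFrom
  rw [PySem.List.pyRange_one_eq_nil (by omega)]
  simp

-- B's zip-of-adjacent-cuts construction produces the same closed-form shard list.
lemma zip_enum_eq_range (chunk t n : Int) (hc : 0 < chunk)
    (hn1 : (n - 1) * chunk < t) (hn2 : t ≤ n * chunk) :
    ∀ (f : Nat) (a : Int), f = (n - a).toNat → a < n →
      (PySem.List.enumerate ((cutsFrom chunk t n a).zip (cutsFrom chunk t n a).tail) a).map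
          (fun p => (p.1, p.2.1, p.2.2)) =
      (PySem.List.pyRange a n 1).map
        (fun x => (x, x * chunk, min ((x + 1) * chunk) t)) := by
  intro f
  induction f with
  | zero => intro a hf ha; omega
  | succ f ih =>
      intro a hf ha
      rw [cutsFrom_cons chunk t n a ha, PySem.List.pyRange_one_cons ha]
      by_cases h1 : a + 1 < n
      · rw [cutsFrom_cons chunk t n (a + 1) h1]
        simp only [List.tail_cons, List.zip_cons_cons, PySem.List.enumerate_cons, List.map_cons]
        have hmin : min ((a + 1) * chunk) t = (a + 1) * chunk := by
          apply min_eq_left; nlinarith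
        have hrest := ih (a + 1) (by omega) h1
        rw [cutsFrom_cons chunk t n (a + 1) h1] at hrest
        simp only [List.tail_cons] at hrest
        rw [hrest, hmin, mul_comm chunk a, mul_comm chunk (a + 1)]
      · rw [cutsFrom_last chunk t n (a + 1) h1]
        have hn : n = a + 1 := by omega
        rw [PySem.List.pyRange_one_eq_nil (by omega)]
        simp [PySem.List.enumerate_cons, PySem.List.enumerate_nil, mul_comm]
        rw [mul_comm, ← hn]
        exact hn2

-- the ceiling division n = ceil(t/chunk) equals the (t + chunk - 1) / chunk form used by pyRange_of_pos
lemma ceil_div_eq (t chunk : Int) (hc : 0 < chunk) :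
    (t + chunk - 1) / chunk = pyCeilDiv t chunk := by
  obtain ⟨h1, h2⟩ := ceil_bracket t chunk hc
  set n := pyCeilDiv t chunk with hn
  have hq := Int.ediv_add_emod (t + chunk - 1) chunk
  have hr0 : 0 ≤ (t + chunk - 1) % chunk := Int.emod_nonneg _ (by omega)
  have hr1 : (t + chunk - 1) % chunk < chunk := Int.emod_lt_of_pos _ hc
  set q := (t + chunk - 1) / chunk with hqdef
  have hub : q * chunk ≤ t + chunk - 1 := by
    have := hq; nlinarith [hq]
  have hlb : t ≤ q * chunk := by nlinarith [hq]
  have hqn1 : q < n + 1 := by nlinarith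
  have hqn2 : n - 1 < q := by nlinarith
  omega

-- the first stage of B: range(0, total, chunk) is the list of shard starts
lemma pyRange_step_eq (t chunk n : Int) (hc : 0 < chunk) (ht : 0 < t)
    (hn : n = pyCeilDiv t chunk) :
    PySem.List.pyRange 0 t chunk = (PySem.List.pyRange 0 n 1).map (fun x => chunk * x) := by
  rw [PySem.List.pyRange_of_pos 0 t hc, if_pos ht, PySem.List.pyRange_one]
  rw [List.map_map]
  have : t - 0 + chunk - 1 = t + chunk - 1 := by ring
  rw [this, ceil_div_eq t chunk hc, ← hn]
  simp [Function.comp]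

-- ===== VERDICT (by name: the statement is the Claim_ definition above) =====
theorem compute_shards_spec : Claim_equal_compute_shards := by
  intro dataset nw _ hpre
  unfold Spec_compute_shards compute_shards compute_shards_alt
  by_cases h0 : (dataset.length : Int) = 0
  · simp [h0]
  · simp only [if_neg h0]
    have ht : 0 < (dataset.length : Int) := by omega
    rcases lt_trichotomy nw 0 with hneg | hz | hpos
    · have hf : nw.toNat = 0 := by omega
      rw [hf, if_pos (le_of_lt hneg)]
      simp [shardLoopA]
    · exfalso
      rcases hpre with h | h
      · exact h0 (by simp [h])
      · exact h hz
    · rw [if_neg (by omega)]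
      set total := (dataset.length : Int) with htot
      set chunk := pyCeilDiv total nw with hchunk
      have hc : 0 < chunk := ceil_pos total nw ht hpos
      obtain ⟨hch1, hch2⟩ := ceil_bracket total nw hpos
      obtain ⟨hn1, hn2⟩ := ceil_bracket total chunk hc
      set n := pyCeilDiv total chunk with hn
      have hnpos : 0 < n := ceil_pos total chunk ht hc
      have hnw : n ≤ nw := by nlinarith
      have hA := loop_eq_range total chunk nw n hc hn1 hn2 hnw nw.toNat 0 (by omega)
      have hcuts : PySem.List.pyRange 0 total chunk ++ [total] = cutsFrom chunk total n 0 := by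
        rw [pyRange_step_eq total chunk n hc ht hn]; rfl
      have hB := zip_enum_eq_range chunk total n hc hn1 hn2 n.toNat 0 (by omega) hnpos
      rw [hcuts, hB]
      simpa using hA
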